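-- pv_equiv track=rewrite | github.com/mmontalbo/binary_lens | scripts/collectors/strings.py | is_printf_format_string
-- ===== SOURCE A (Python) =====
-- def is_printf_format_string(value):
--     if value is None or "%" not in value:
--         return False
--     length = len(value)
--     idx = 0
--     while idx < length:
--         if value[idx] != "%":
--             idx += 1
--             continue
--         if idx + 1 < length and value[idx + 1] == "%":
--             idx += 2
--             continue
--         j = idx + 1
--         while j < length and value[j] in "#0- +":
--             j += 1
--         while j < length and value[j].isdigit():
--             j += 1
--         if j < length and value[j] == ".":
--             j += 1
--             while j < length and value[j].isdigit():
--                 j += 1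
--         while j < length and value[j] in "hljztL":
--             j += 1
--         if j < length and value[j].isalpha():
--             return True
--         idx = j + 1
--     return False
-- ===== SOURCE B (Python) =====
-- def is_printf_format_string(value):
--     # Single forward pass: a 5-state automaton (text/flags/width/precision/length)
--     # consumes one character at a time instead of A's index-jumping nested loops.
--     if value is None:
--         return False
--     state = 0  # 0 text, 1 flags, 2 width, 3 precision, 4 length
--     for c in value:
--         if state == 0:
--             state = 1 if c == "%" else 0
--         elif c.isalpha() and c not in "hljztL":
--             return True
--         elif state == 1 and c in "#0- +":
--             state = 1
--         elif state <= 2 and c.isdigit():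
--             state = 2
--         elif state <= 2 and c == ".":
--             state = 3
--         elif state == 3 and c.isdigit():
--             state = 3
--         elif c in "hljztL":
--             state = 4
--         else:
--             state = 0
--     return False
-- ===== Notes on version B (the rewrite author's own statement) =====
-- stated objective: alternative
-- what changed: A's index-jumping outer while-loop with nested flag/width/precision/length scanning loops is replaced by a single forward pass over the characters driven by a five-state automaton (text/flags/width/precision/length) that also subsumes A's separate escaped-percent skip and its initial percent-membership test.
import Mathlib
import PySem

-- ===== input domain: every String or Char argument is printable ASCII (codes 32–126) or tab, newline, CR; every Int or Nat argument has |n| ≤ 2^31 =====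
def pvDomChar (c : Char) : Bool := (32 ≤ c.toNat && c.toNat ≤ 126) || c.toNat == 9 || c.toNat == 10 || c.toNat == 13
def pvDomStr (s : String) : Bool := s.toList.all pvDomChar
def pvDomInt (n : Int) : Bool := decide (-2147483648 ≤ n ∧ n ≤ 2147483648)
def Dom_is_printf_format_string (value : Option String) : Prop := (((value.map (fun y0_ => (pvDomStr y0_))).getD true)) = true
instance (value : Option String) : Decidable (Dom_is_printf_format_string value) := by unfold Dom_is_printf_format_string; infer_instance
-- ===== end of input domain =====

-- B replaces A's index-jumping nested while-loops with a single forward pass driven by a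
-- five-state automaton (alternative decomposition, same O(n) cost).

-- ===== PORT A =====
-- A's inner scanning loops (flags, digit runs, length modifiers), index-based as in the Python.
def aFlags (cs : List Char) (j : Nat) : Nat :=
  if h : j < cs.length ∧ cs.getD j ' ' ∈ "#0- +".toList then aFlags cs (j+1) else j
termination_by cs.length - j
decreasing_by omega

def aDigits (cs : List Char) (j : Nat) : Nat :=
  if h : j < cs.length ∧ PySem.Chars.isdigit (cs.getD j ' ') = true then aDigits cs (j+1) else j
termination_by cs.length - j
decreasing_by omega

def aLengths (cs : List Char) (j : Nat) : Nat :=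
  if h : j < cs.length ∧ cs.getD j ' ' ∈ "hljztL".toList then aLengths cs (j+1) else j
termination_by cs.length - j
decreasing_by omega

theorem aFlags_le (cs : List Char) (j : Nat) : j ≤ aFlags cs j := by
  fun_induction aFlags cs j <;> omega

theorem aDigits_le (cs : List Char) (j : Nat) : j ≤ aDigits cs j := by
  fun_induction aDigits cs j <;> omega

theorem aLengths_le (cs : List Char) (j : Nat) : j ≤ aLengths cs j := by
  fun_induction aLengths cs j <;> omega

-- A's outer while-loop over idx.
def aMain (cs : List Char) (idx : Nat) : Bool :=
  if h : idx < cs.length then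
    if cs.getD idx ' ' ≠ '%' then aMain cs (idx+1)
    else if idx+1 < cs.length ∧ cs.getD (idx+1) ' ' = '%' then aMain cs (idx+2)
    else
      let j1 := aFlags cs (idx+1)
      let j2 := aDigits cs j1
      let j3 := if j2 < cs.length ∧ cs.getD j2 ' ' = '.' then aDigits cs (j2+1) else j2
      let j4 := aLengths cs j3
      if j4 < cs.length ∧ PySem.Chars.isalpha (cs.getD j4 ' ') = true then true
      else aMain cs (j4+1)
  else false
termination_by cs.length - idx
decreasing_by
  · omega
  · omega
  · have h1 := aFlags_le cs (idx+1)
    have h2 := aDigits_le cs (aFlags cs (idx+1))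
    split
    · have h3 := aDigits_le cs (aDigits cs (aFlags cs (idx+1)) + 1)
      have h4 := aLengths_le cs (aDigits cs (aDigits cs (aFlags cs (idx+1)) + 1))
      omega
    · have h4 := aLengths_le cs (aDigits cs (aFlags cs (idx+1)))
      omega

def is_printf_format_string (value : Option String) : Bool :=
  match value with
  | none => false
  | some s => if PySem.Str.isIn "%" s = false then false else aMain s.toList 0

-- ===== PORT B =====
-- B's single pass: st = 0 text, 1 flags, 2 width, 3 precision, 4 length modifier.
def bLoop (cs : List Char) (st : Nat) : Bool :=
  match cs with
  | [] => false
  | c :: rest =>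
    if st = 0 then bLoop rest (if c = '%' then 1 else 0)
    else if PySem.Chars.isalpha c = true ∧ c ∉ "hljztL".toList then true
    else if st = 1 ∧ c ∈ "#0- +".toList then bLoop rest 1
    else if st ≤ 2 ∧ PySem.Chars.isdigit c = true then bLoop rest 2
    else if st ≤ 2 ∧ c = '.' then bLoop rest 3
    else if st = 3 ∧ PySem.Chars.isdigit c = true then bLoop rest 3
    else if c ∈ "hljztL".toList then bLoop rest 4
    else bLoop rest 0

def is_printf_format_string_alt (value : Option String) : Bool :=
  match value with
  | none => false
  | some s => bLoop s.toList 0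

-- ===== PRECONDITION & SPEC =====
def Spec_is_printf_format_string (value : Option String) (out : Bool) : Prop := out = is_printf_format_string_alt value
instance (value : Option String) (out : Bool) : Decidable (Spec_is_printf_format_string value out) := by unfold Spec_is_printf_format_string; infer_instance

-- ===== CLAIM (what is proved, stated in full; the proofs are below) =====
def Claim_equal_is_printf_format_string : Prop := ∀ (value : Option String), Dom_is_printf_format_string value → Spec_is_printf_format_string value (is_printf_format_string value)

-- ===== LEMMAS AND PROOFS =====

-- character-class facts
theorem flags_eq : "#0- +".toList = ['#', '0', '-', ' ', '+'] := rfl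

theorem mem_flags_not_alpha {c : Char} (h : c ∈ "#0- +".toList) :
    PySem.Chars.isalpha c = false := by
  rw [flags_eq] at h; fin_cases h <;> decide

theorem digit_not_alpha {c : Char} (h : PySem.Chars.isdigit c = true) :
    PySem.Chars.isalpha c = false := by
  have h0 : ('0':Char).val.toNat = 48 := rfl
  have h9 : ('9':Char).val.toNat = 57 := rfl
  have hA : ('A':Char).val.toNat = 65 := rfl
  have hZ : ('Z':Char).val.toNat = 90 := rfl
  have ha : ('a':Char).val.toNat = 97 := rfl
  have hz : ('z':Char).val.toNat = 122 := rfl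
  simp only [PySem.Chars.isalpha, PySem.Chars.isupper, PySem.Chars.islower, PySem.Chars.isdigit,
    Bool.and_eq_true, decide_eq_true_eq, Bool.or_eq_false_iff,
    Bool.and_eq_false_iff, decide_eq_false_iff_not, Char.le_def, UInt32.le_iff_toNat_le] at *
  omega

theorem not_alpha_of_digit {cs : List Char} {j : Nat}
    (hd : PySem.Chars.isdigit (cs.getD j ' ') = true)
    (hx : PySem.Chars.isalpha (cs.getD j ' ') = true ∧ cs.getD j ' ' ∉ "hljztL".toList) : False := by
  have hna := digit_not_alpha hd
  rw [hx.1] at hna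
  exact absurd hna (by decide)

-- cons/nil views of a drop, phrased through getD as the ports read the string
theorem drop_cons {cs : List Char} {j : Nat} (h : j < cs.length) :
    cs.drop j = cs.getD j ' ' :: cs.drop (j+1) := by
  rw [List.drop_eq_getElem_cons h, List.getD_eq_getElem cs ' ' h]

theorem drop_nil {cs : List Char} {j : Nat} (h : ¬ j < cs.length) : cs.drop j = [] :=
  List.drop_eq_nil_of_le (by omega)

-- shared tail: what B computes once A's flag/width/precision/length prefix has been consumed
def tailAt (cs : List Char) (j4 : Nat) : Bool :=
  if j4 < cs.length ∧ PySem.Chars.isalpha (cs.getD j4 ' ') = true then true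
  else bLoop (cs.drop (j4+1)) 0

-- B's automaton states 4,3,2,1 against A's scanning loops, back to front
theorem S4 (cs : List Char) (j : Nat) :
    bLoop (cs.drop j) 4 = tailAt cs (aLengths cs j) := by
  fun_induction aLengths cs j with
  | case1 j h ih =>
    rw [drop_cons h.1]
    simp only [bLoop]
    rw [if_neg (by decide), if_neg (fun hx => hx.2 h.2),
        if_neg (fun hx => absurd hx.1 (by decide)), if_neg (fun hx => absurd hx.1 (by decide)),
        if_neg (fun hx => absurd hx.1 (by decide)), if_neg (fun hx => absurd hx.1 (by decide)),
        if_pos h.2]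
    exact ih
  | case2 j h =>
    by_cases hj : j < cs.length
    · have hc : cs.getD j ' ' ∉ "hljztL".toList := fun hm => h ⟨hj, hm⟩
      rw [drop_cons hj]
      simp only [bLoop]
      by_cases ha : PySem.Chars.isalpha (cs.getD j ' ') = true
      · rw [if_neg (by decide), if_pos ⟨ha, hc⟩, tailAt, if_pos ⟨hj, ha⟩]
      · rw [if_neg (by decide), if_neg (fun hx => ha hx.1),
            if_neg (fun hx => absurd hx.1 (by decide)), if_neg (fun hx => absurd hx.1 (by decide)),
            if_neg (fun hx => absurd hx.1 (by decide)), if_neg (fun hx => absurd hx.1 (by decide)),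
            if_neg hc, tailAt, if_neg (fun hx => ha hx.2)]
    · rw [drop_nil hj, tailAt, if_neg (by omega), drop_nil (by omega)]
      rfl

theorem S3 (cs : List Char) (j : Nat) :
    bLoop (cs.drop j) 3 = tailAt cs (aLengths cs (aDigits cs j)) := by
  fun_induction aDigits cs j with
  | case1 j h ih =>
    rw [drop_cons h.1]
    simp only [bLoop]
    rw [if_neg (by decide), if_neg (not_alpha_of_digit h.2),
        if_neg (fun hx => absurd hx.1 (by decide)), if_neg (fun hx => absurd hx.1 (by decide)),
        if_neg (fun hx => absurd hx.1 (by decide)), if_pos ⟨trivial, h.2⟩]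
    exact ih
  | case2 j h =>
    by_cases hj : j < cs.length
    · have hd : ¬ PySem.Chars.isdigit (cs.getD j ' ') = true := fun hm => h ⟨hj, hm⟩
      rw [drop_cons hj]
      simp only [bLoop]
      by_cases hl : cs.getD j ' ' ∈ "hljztL".toList
      · rw [if_neg (by decide), if_neg (fun hx => hx.2 hl),
            if_neg (fun hx => absurd hx.1 (by decide)), if_neg (fun hx => absurd hx.1 (by decide)),
            if_neg (fun hx => absurd hx.1 (by decide)), if_neg (fun hx => hd hx.2), if_pos hl,
            aLengths, dif_pos ⟨hj, hl⟩]
        exact S4 cs (j+1)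
      · by_cases ha : PySem.Chars.isalpha (cs.getD j ' ') = true
        · rw [if_neg (by decide), if_pos ⟨ha, hl⟩, aLengths, dif_neg (fun hx => hl hx.2),
              tailAt, if_pos ⟨hj, ha⟩]
        · rw [if_neg (by decide), if_neg (fun hx => ha hx.1),
              if_neg (fun hx => absurd hx.1 (by decide)), if_neg (fun hx => absurd hx.1 (by decide)),
              if_neg (fun hx => absurd hx.1 (by decide)), if_neg (fun hx => hd hx.2), if_neg hl,
              aLengths, dif_neg (fun hx => hl hx.2), tailAt, if_neg (fun hx => ha hx.2)]
    · rw [drop_nil hj, aLengths, dif_neg (fun hx => hj hx.1), tailAt, if_neg (fun hx => hj hx.1),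
          drop_nil (by omega)]
      rfl

theorem S2 (cs : List Char) (j : Nat) :
    bLoop (cs.drop j) 2 = tailAt cs (aLengths cs
      (if aDigits cs j < cs.length ∧ cs.getD (aDigits cs j) ' ' = '.' then
        aDigits cs (aDigits cs j + 1) else aDigits cs j)) := by
  fun_induction aDigits cs j with
  | case1 j h ih =>
    rw [drop_cons h.1]
    simp only [bLoop]
    rw [if_neg (by decide), if_neg (not_alpha_of_digit h.2),
        if_neg (fun hx => absurd hx.1 (by decide)), if_pos ⟨by omega, h.2⟩]
    exact ih
  | case2 j h =>
    by_cases hj : j < cs.length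
    · have hd : ¬ PySem.Chars.isdigit (cs.getD j ' ') = true := fun hm => h ⟨hj, hm⟩
      rw [drop_cons hj]
      simp only [bLoop]
      by_cases hdot : cs.getD j ' ' = '.'
      · rw [if_neg (by decide), if_neg (fun hx => by rw [hdot] at hx; exact absurd hx.1 (by decide)),
            if_neg (fun hx => absurd hx.1 (by decide)), if_neg (fun hx => hd hx.2),
            if_pos ⟨by omega, hdot⟩, if_pos ⟨hj, hdot⟩]
        exact S3 cs (j+1)
      · by_cases hl : cs.getD j ' ' ∈ "hljztL".toList
        · rw [if_neg (by decide), if_neg (fun hx => hx.2 hl),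
              if_neg (fun hx => absurd hx.1 (by decide)), if_neg (fun hx => hd hx.2),
              if_neg (fun hx => hdot hx.2), if_neg (fun hx => absurd hx.1 (by decide)), if_pos hl,
              if_neg (fun hx => hdot hx.2), aLengths, dif_pos ⟨hj, hl⟩]
          exact S4 cs (j+1)
        · by_cases ha : PySem.Chars.isalpha (cs.getD j ' ') = true
          · rw [if_neg (by decide), if_pos ⟨ha, hl⟩, if_neg (fun hx => hdot hx.2),
                aLengths, dif_neg (fun hx => hl hx.2), tailAt, if_pos ⟨hj, ha⟩]
          · rw [if_neg (by decide), if_neg (fun hx => ha hx.1),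
                if_neg (fun hx => absurd hx.1 (by decide)), if_neg (fun hx => hd hx.2),
                if_neg (fun hx => hdot hx.2), if_neg (fun hx => absurd hx.1 (by decide)), if_neg hl,
                if_neg (fun hx => hdot hx.2), aLengths, dif_neg (fun hx => hl hx.2),
                tailAt, if_neg (fun hx => ha hx.2)]
    · rw [drop_nil hj, if_neg (fun hx => hj hx.1), aLengths, dif_neg (fun hx => hj hx.1),
          tailAt, if_neg (fun hx => hj hx.1), drop_nil (by omega)]
      rfl

theorem S1 (cs : List Char) (j : Nat) :
    bLoop (cs.drop j) 1 = tailAt cs (aLengths cs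
      (if aDigits cs (aFlags cs j) < cs.length ∧ cs.getD (aDigits cs (aFlags cs j)) ' ' = '.' then
        aDigits cs (aDigits cs (aFlags cs j) + 1) else aDigits cs (aFlags cs j))) := by
  fun_induction aFlags cs j with
  | case1 j h ih =>
    rw [drop_cons h.1]
    simp only [bLoop]
    rw [if_neg (by decide),
        if_neg (fun hx => by have := mem_flags_not_alpha h.2; rw [hx.1] at this; exact absurd this (by decide)),
        if_pos ⟨trivial, h.2⟩]
    exact ih
  | case2 j h =>
    by_cases hj : j < cs.length
    · have hf : cs.getD j ' ' ∉ "#0- +".toList := fun hm => h ⟨hj, hm⟩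
      rw [drop_cons hj]
      simp only [bLoop]
      by_cases hd : PySem.Chars.isdigit (cs.getD j ' ') = true
      · rw [if_neg (by decide), if_neg (not_alpha_of_digit hd), if_neg (fun hx => hf hx.2),
            if_pos ⟨by omega, hd⟩, aDigits, dif_pos ⟨hj, hd⟩]
        exact S2 cs (j+1)
      · by_cases hdot : cs.getD j ' ' = '.'
        · rw [if_neg (by decide), if_neg (fun hx => by rw [hdot] at hx; exact absurd hx.1 (by decide)),
              if_neg (fun hx => hf hx.2), if_neg (fun hx => hd hx.2), if_pos ⟨by omega, hdot⟩,
              aDigits, dif_neg (fun hx => hd hx.2), if_pos ⟨hj, hdot⟩]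
          exact S3 cs (j+1)
        · by_cases hl : cs.getD j ' ' ∈ "hljztL".toList
          · rw [if_neg (by decide), if_neg (fun hx => hx.2 hl), if_neg (fun hx => hf hx.2),
                if_neg (fun hx => hd hx.2), if_neg (fun hx => hdot hx.2),
                if_neg (fun hx => absurd hx.1 (by decide)), if_pos hl,
                aDigits, dif_neg (fun hx => hd hx.2), if_neg (fun hx => hdot hx.2),
                aLengths, dif_pos ⟨hj, hl⟩]
            exact S4 cs (j+1)
          · by_cases ha : PySem.Chars.isalpha (cs.getD j ' ') = true
            · rw [if_neg (by decide), if_pos ⟨ha, hl⟩, aDigits, dif_neg (fun hx => hd hx.2),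
                  if_neg (fun hx => hdot hx.2), aLengths, dif_neg (fun hx => hl hx.2),
                  tailAt, if_pos ⟨hj, ha⟩]
            · rw [if_neg (by decide), if_neg (fun hx => ha hx.1), if_neg (fun hx => hf hx.2),
                  if_neg (fun hx => hd hx.2), if_neg (fun hx => hdot hx.2),
                  if_neg (fun hx => absurd hx.1 (by decide)), if_neg hl,
                  aDigits, dif_neg (fun hx => hd hx.2), if_neg (fun hx => hdot hx.2),
                  aLengths, dif_neg (fun hx => hl hx.2), tailAt, if_neg (fun hx => ha hx.2)]
    · rw [drop_nil hj, aDigits, dif_neg (fun hx => hj hx.1),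
          if_neg (fun hx => hj hx.1), aLengths, dif_neg (fun hx => hj hx.1),
          tailAt, if_neg (fun hx => hj hx.1), drop_nil (by omega)]
      rfl

-- A's outer loop against B's whole pass
theorem mainEq (cs : List Char) (idx : Nat) : aMain cs idx = bLoop (cs.drop idx) 0 := by
  fun_induction aMain cs idx with
  | case1 idx h1 h2 ih =>
    rw [drop_cons h1]
    simp only [bLoop]
    rw [if_pos trivial, if_neg h2]
    exact ih
  | case2 idx h1 h2 h3 ih =>
    rw [drop_cons h1, not_ne_iff.mp h2]
    simp only [bLoop]
    rw [if_pos trivial, if_pos trivial, drop_cons h3.1, h3.2]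
    simp only [bLoop]
    rw [if_neg (by decide), if_neg (by decide), if_neg (by decide), if_neg (by decide),
        if_neg (by decide), if_neg (by decide), if_neg (by decide)]
    exact ih
  | case3 idx h1 h2 h3 j1 j2 j3 j4 hcond =>
    rw [drop_cons h1, not_ne_iff.mp h2]
    simp only [bLoop]
    rw [if_pos trivial, if_pos trivial, S1 cs (idx+1), tailAt]
    simp only [j1, j2, j3, j4, dite_eq_ite] at hcond
    rw [if_pos hcond]
  | case4 idx h1 h2 h3 j1 j2 j3 j4 hcond ih =>
    rw [ih, drop_cons h1, not_ne_iff.mp h2]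
    simp only [bLoop]
    rw [if_pos trivial, if_pos trivial, S1 cs (idx+1), tailAt]
    simp only [j1, j2, j3, j4, dite_eq_ite] at hcond ⊢
    rw [if_neg hcond]
  | case5 idx h =>
    rw [drop_nil h]
    rfl

theorem noPct {cs : List Char} (h : '%' ∉ cs) : bLoop cs 0 = false := by
  induction cs with
  | nil => rfl
  | cons c rest ih =>
    simp only [List.mem_cons, not_or] at h
    have hc : ¬ c = '%' := fun hh => h.1 hh.symm
    simpa [bLoop, hc] using ih h.2

-- ===== VERDICT (by name: the statement is the Claim_ definition above) =====
theorem is_printf_format_string_spec : Claim_equal_is_printf_format_string := by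
  intro value _
  unfold Spec_is_printf_format_string
  match value with
  | none => rfl
  | some s =>
    simp only [is_printf_format_string, is_printf_format_string_alt]
    by_cases h : PySem.Str.isIn "%" s = false
    · rw [if_pos h]
      have hni : ¬ ("%".toList <:+: s.toList) := by
        intro hi; rw [← PySem.Chars.isIn_iff_infix] at hi
        rw [show PySem.Str.isIn "%" s = PySem.Chars.isIn "%".toList s.toList from rfl, hi] at h
        exact absurd h (by decide)
      rw [noPct (fun hm => hni ((List.singleton_infix_iff '%' s.toList).mpr hm))]
    · rw [if_neg h, mainEq, List.drop_zero]
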